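-- pv_equiv track=rewrite | github.com/miliar/Code_Jam_Webscraper | Solutions_python/Problem_155/2172.py | toed
-- ===== SOURCE A (Python) =====
-- def toed(c, a, p):
--     f=0
--     s=int(p[0])
--     for i in range(1,a+1):
--         if s>=i:
--             s+=int(p[i])
--         else:
--             f+=i-s
--             s+=int(p[i])+i-s
--     return "Case #"+str(c)+": "+str(f)
-- ===== SOURCE B (Python) =====
-- def toed(c, a, p):
--     # Stage 1: convert exactly the entries A reads, in the same order (so exceptions match).
--     vals = [int(p[0])] + [int(p[i]) for i in range(1, a + 1)]
--     # Stage 2: pure prefix sums: prefixes[i] = vals[0] + ... + vals[i-1].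
--     prefixes = [0]
--     for v in vals:
--         prefixes.append(prefixes[-1] + v)
--     # Stage 3: the answer is the largest prefix shortfall, max(0, max_i (i - prefixes[i])).
--     f = max([0] + [i - prefixes[i] for i in range(1, a + 1)])
--     return "Case #" + str(c) + ": " + str(f)
-- ===== Notes on version B (the rewrite author's own statement) =====
-- stated objective: alternative
-- what changed: B replaces A's one-pass stateful simulation (corrected running sum s plus lift accumulator f) by three staged passes - convert values, build the pure prefix-sum list, then take the maximum prefix shortfall max(0, max_i (i - prefixes[i])) - using the identity that A's total lift equals the largest single shortfall.
import Mathlib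
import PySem

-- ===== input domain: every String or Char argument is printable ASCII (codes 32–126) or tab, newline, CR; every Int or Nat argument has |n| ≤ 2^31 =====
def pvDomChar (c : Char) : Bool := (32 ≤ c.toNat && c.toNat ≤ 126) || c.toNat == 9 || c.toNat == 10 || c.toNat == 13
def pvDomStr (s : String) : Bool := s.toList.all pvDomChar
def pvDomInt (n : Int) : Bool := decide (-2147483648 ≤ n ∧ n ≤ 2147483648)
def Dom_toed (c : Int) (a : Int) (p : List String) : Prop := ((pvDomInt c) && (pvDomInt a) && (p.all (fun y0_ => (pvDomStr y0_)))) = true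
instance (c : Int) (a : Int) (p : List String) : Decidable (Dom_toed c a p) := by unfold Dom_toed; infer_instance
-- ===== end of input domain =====

-- B replaces A's one-pass stateful simulation by three staged passes (convert, prefix sums,
-- maximum prefix shortfall); same O(a) cost, different algorithm (objective: alternative).

-- ===== PORT A =====
-- int(p[i]); Pre_toed guarantees the index is in range and the string parses, so getD is never hit.
def toedVal (p : List String) (i : Int) : Int :=
  (PySem.Int.ofStr? ((PySem.List.pyGet? p i).getD "")).getD 0

def toed (c : Int) (a : Int) (p : List String) : String :=
  let st :=
    (PySem.List.pyRange 1 (a + 1) 1).foldl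
      (fun (fs : Int × Int) i =>
        if fs.2 ≥ i then (fs.1, fs.2 + toedVal p i)
        else (fs.1 + (i - fs.2), fs.2 + (toedVal p i + i - fs.2)))
      (0, toedVal p 0)
  "Case #" ++ PySem.Int.toStr c ++ ": " ++ PySem.Int.toStr st.1

-- ===== PORT B =====
-- int(p[i]) on B's side; Pre_toed guarantees the index is in range and the string parses.
def toedValB (p : List String) (i : Int) : Int :=
  (PySem.Int.ofStr? ((PySem.List.pyGet? p i).getD "")).getD 0

def toed_alt (c : Int) (a : Int) (p : List String) : String :=
  let vals := toedValB p 0 :: (PySem.List.pyRange 1 (a + 1) 1).map (toedValB p)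
  let prefixes :=
    vals.foldl (fun acc v => acc ++ [(PySem.List.pyGet? acc (-1)).getD 0 + v]) ([0] : List Int)
  let deficits :=
    (PySem.List.pyRange 1 (a + 1) 1).map (fun i => i - (PySem.List.pyGet? prefixes i).getD 0)
  let f := (PySem.List.max? ((0 : Int) :: deficits) (fun x => x)).getD 0
  "Case #" ++ PySem.Int.toStr c ++ ": " ++ PySem.Int.toStr f

-- ===== PRECONDITION & SPEC =====
-- A raises (IndexError / ValueError from int()) unless indices 0..max(a,0) exist in p and parse as ints.
def Pre_toed (c : Int) (a : Int) (p : List String) : Prop :=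
  (max a 0).toNat < p.length ∧
  ∀ s ∈ p.take ((max a 0).toNat + 1), (PySem.Int.ofStr? s).isSome
instance (c : Int) (a : Int) (p : List String) : Decidable (Pre_toed c a p) := by
  unfold Pre_toed; infer_instance

def pvWitness_toed : Int × Int × List String := (3, 2, ["1", "0", "2"])

def Spec_toed (c : Int) (a : Int) (p : List String) (out : String) : Prop := out = toed_alt c a p
instance (c : Int) (a : Int) (p : List String) (out : String) : Decidable (Spec_toed c a p out) := by
  unfold Spec_toed; infer_instance

-- ===== CLAIM (what is proved, stated in full; the proofs are below) =====
def Claim_equal_toed : Prop :=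
  ∀ (c : Int) (a : Int) (p : List String), Dom_toed c a p → Pre_toed c a p → Spec_toed c a p (toed c a p)

-- ===== LEMMAS AND PROOFS =====

/-- Q p k = vals[0] + … + vals[k-1], the pure prefix sum. -/
def toedQ (p : List String) (k : Nat) : Int :=
  ((List.range k).map (fun j : Nat => toedVal p (j : Int))).sum

theorem toedValB_eq : toedValB = toedVal := rfl

theorem toedQ_succ (p : List String) (k : Nat) :
    toedQ p (k + 1) = toedQ p k + toedVal p (k : Int) := by
  simp [toedQ, List.range_succ]

/-- B's prefix-building fold is List.scanl (·+·). -/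
theorem prefixes_eq_scanl (l : List Int) :
    ∀ (pre : List Int) (s : Int),
      l.foldl (fun acc v => acc ++ [(PySem.List.pyGet? acc (-1)).getD 0 + v]) (pre ++ [s])
        = pre ++ List.scanl (· + ·) s l := by
  induction l with
  | nil => intro pre s; simp
  | cons v l ih =>
      intro pre s
      simp only [List.foldl_cons, PySem.List.pyGet?_neg_one_append_singleton, Option.getD_some,
        List.scanl_cons]
      have h := ih (pre ++ [s]) (s + v)
      simpa [List.append_assoc] using h

/-- getElem? of the additive scanl gives the prefix sum. -/
theorem scanl_getElem? (l : List Int) :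
    ∀ (s : Int) (k : Nat), k ≤ l.length →
      (List.scanl (· + ·) s l)[k]? = some (s + (l.take k).sum) := by
  induction l with
  | nil =>
      intro s k hk
      simp only [List.length_nil, Nat.le_zero] at hk
      subst hk
      simp
  | cons v l ih =>
      intro s k hk
      cases k with
      | zero => simp
      | succ k =>
          simp only [List.scanl_cons, List.getElem?_cons_succ, List.take_succ_cons, List.sum_cons]
          rw [ih (s + v) k (by simpa using hk)]
          ring_nf

def toedStepA (p : List String) : (Int × Int) → Int → (Int × Int) :=
  fun fs i =>
    if fs.2 ≥ i then (fs.1, fs.2 + toedVal p i)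
    else (fs.1 + (i - fs.2), fs.2 + (toedVal p i + i - fs.2))

def toedRunA (p : List String) (n : Nat) : Int × Int :=
  (PySem.List.pyRange 1 ((n : Int) + 1) 1).foldl (toedStepA p) (0, toedVal p 0)

def toedMaxB (p : List String) (n : Nat) : Int :=
  ((PySem.List.pyRange 1 ((n : Int) + 1) 1).map (fun i => i - toedQ p i.toNat)).foldl max 0

/-- The core identity: A's state after the loop over 1..n is
    (max shortfall, Q (n+1) + max shortfall). -/
theorem toed_main (p : List String) (n : Nat) :
    (toedRunA p n).1 = toedMaxB p n ∧
    (toedRunA p n).2 = toedQ p (n + 1) + (toedRunA p n).1 := by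
  induction n with
  | zero =>
      constructor
      · simp [toedRunA, toedMaxB, PySem.List.pyRange_one_eq_nil]
      · simp [toedRunA, PySem.List.pyRange_one_eq_nil, toedQ, List.range_succ]
  | succ n ih =>
      obtain ⟨ih1, ih2⟩ := ih
      have hsplit : PySem.List.pyRange 1 ((n + 1 : Nat) + 1) 1
          = PySem.List.pyRange 1 ((n : Int) + 1) 1 ++ [(n : Int) + 1] := by
        push_cast
        exact PySem.List.pyRange_one_succ_right (by omega)
      have hQ : toedQ p (n + 1 + 1) = toedQ p (n + 1) + toedVal p ((n : Int) + 1) := by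
        have := toedQ_succ p (n + 1)
        simpa using this
      have htoNat : ((n : Int) + 1).toNat = n + 1 := by omega
      constructor
      · rw [toedRunA, toedMaxB, hsplit, List.foldl_append, List.map_append, List.foldl_append]
        simp only [List.foldl_cons, List.foldl_nil, List.map_cons, List.map_nil]
        rw [← toedRunA, ← toedMaxB, ← ih1, htoNat]
        simp only [toedStepA]
        split_ifs with h
        · have hle : ((n : Int) + 1) - toedQ p (n + 1) ≤ (toedRunA p n).1 := by omega
          simp [max_eq_left hle]
        · have hle : (toedRunA p n).1 ≤ ((n : Int) + 1) - toedQ p (n + 1) := by omega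
          simp [max_eq_right hle]
          omega
      · rw [toedRunA, hsplit, List.foldl_append]
        simp only [List.foldl_cons, List.foldl_nil]
        rw [← toedRunA]
        simp only [toedStepA]
        split_ifs with h
        · simp only []
          omega
        · simp only []
          omega

/-- B's staged computation also yields the maximum shortfall. -/
theorem toed_alt_f_eq (p : List String) (n : Nat) :
    (PySem.List.max? ((0 : Int) ::
        (PySem.List.pyRange 1 ((n : Int) + 1) 1).map
          (fun i => i - (PySem.List.pyGet?
              ((toedVal p 0 :: (PySem.List.pyRange 1 ((n : Int) + 1) 1).map (toedVal p)).foldl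
                (fun acc v => acc ++ [(PySem.List.pyGet? acc (-1)).getD 0 + v]) ([0] : List Int))
              i).getD 0))
        (fun x => x)).getD 0 = toedMaxB p n := by
  have hcons : toedVal p 0 :: (PySem.List.pyRange 1 ((n : Int) + 1) 1).map (toedVal p)
      = (PySem.List.pyRange 0 ((n : Int) + 1) 1).map (toedVal p) := by
    have h0 : PySem.List.pyRange 0 ((n : Int) + 1) 1 = 0 :: PySem.List.pyRange (0 + 1) ((n : Int) + 1) 1 :=
      PySem.List.pyRange_one_cons (by omega)
    rw [h0, List.map_cons]
    norm_num
  rw [hcons]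
  have hvals : (PySem.List.pyRange 0 ((n : Int) + 1) 1).map (toedVal p)
      = (List.range (n + 1)).map (fun j : Nat => toedVal p (0 + (j : Int))) := by
    rw [PySem.List.pyRange_one, List.map_map]
    have hN : (((n : Int) + 1) - 0).toNat = n + 1 := by omega
    rw [hN]
    rfl
  have hpref : ((PySem.List.pyRange 0 ((n : Int) + 1) 1).map (toedVal p)).foldl
      (fun acc v => acc ++ [(PySem.List.pyGet? acc (-1)).getD 0 + v]) ([0] : List Int)
      = List.scanl (· + ·) 0 ((PySem.List.pyRange 0 ((n : Int) + 1) 1).map (toedVal p)) := by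
    have h := prefixes_eq_scanl ((PySem.List.pyRange 0 ((n : Int) + 1) 1).map (toedVal p)) [] 0
    simpa using h
  rw [PySem.List.max?_id_cons, Option.getD_some, toedMaxB]
  congr 1
  apply List.map_congr_left
  intro i hi
  rw [PySem.List.mem_pyRange_one] at hi
  have h0 : (0 : Int) ≤ i := by omega
  have hk : i.toNat ≤ ((PySem.List.pyRange 0 ((n : Int) + 1) 1).map (toedVal p)).length := by
    simp only [List.length_map, PySem.List.length_pyRange_one]
    omega
  rw [hpref, PySem.List.pyGet?_of_nonneg
      (List.scanl (· + ·) 0 ((PySem.List.pyRange 0 ((n : Int) + 1) 1).map (toedVal p))) h0,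
    scanl_getElem? _ _ _ hk, Option.getD_some]
  have htake : ((PySem.List.pyRange 0 ((n : Int) + 1) 1).map (toedVal p)).take i.toNat
      = (List.range i.toNat).map (fun j : Nat => toedVal p (0 + (j : Int))) := by
    rw [hvals, ← List.map_take, List.take_range]
    have hmin : min i.toNat (n + 1) = i.toNat := by omega
    rw [hmin]
  rw [htake]
  simp only [toedQ, zero_add]

-- ===== VERDICT (by name: the statement is the Claim_ definition above) =====
theorem toed_spec : Claim_equal_toed := by
  intro c a p _ _
  unfold Spec_toed
  simp only [toed, toed_alt, toedValB_eq]
  have hstep : (fun (fs : Int × Int) i =>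
      if fs.2 ≥ i then (fs.1, fs.2 + toedVal p i)
      else (fs.1 + (i - fs.2), fs.2 + (toedVal p i + i - fs.2))) = toedStepA p := rfl
  by_cases ha : 0 ≤ a
  · obtain ⟨n, rfl⟩ := Int.eq_ofNat_of_zero_le ha
    rw [hstep]
    have hA : ((PySem.List.pyRange 1 ((n : Int) + 1) 1).foldl (toedStepA p) (0, toedVal p 0)).1
        = toedMaxB p n := (toed_main p n).1
    rw [hA, toed_alt_f_eq]
  · have h1 : PySem.List.pyRange 1 (a + 1) 1 = [] := PySem.List.pyRange_one_eq_nil (by omega)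
    simp [h1, PySem.List.max?_id_cons]
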